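-- pv_equiv track=rewrite | github.com/Ceridan/advent-of-code-2020 | days/day24.py | _parse_tiles_list
-- ===== SOURCE A (Python) =====
-- from typing import List, Tuple, Set
--
-- DIRECTIONS_TO_COORDS = {
--     'e': (1, 0),
--     'se': (1, -1),
--     'sw': (0, -1),
--     'w': (-1, 0),
--     'nw': (-1, 1),
--     'ne': (0, 1),
-- }
--
-- def _parse_tiles_list(tiles_list: List[str]) -> Set[Tuple[int, int]]:
--     black_tiles = set()
--
--     for line in tiles_list:
--         x, y, i = 0, 0, 0
--
--         while i < len(line):
--             ch = line[i]
--             if ch in 'sn':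
--                 i += 1
--                 ch += line[i]
--             dx, dy = DIRECTIONS_TO_COORDS[ch]
--             x += dx
--             y += dy
--             i += 1
--
--         if (x, y) in black_tiles:
--             black_tiles.remove((x, y))
--         else:
--             black_tiles.add((x, y))
--
--     return black_tiles
-- ===== SOURCE B (Python) =====
-- from typing import List, Tuple, Set
--
-- DIRECTIONS_TO_COORDS = {
--     'e': (1, 0),
--     'se': (1, -1),
--     'sw': (0, -1),
--     'w': (-1, 0),
--     'nw': (-1, 1),
--     'ne': (0, 1),
-- }
--
--
-- def _tokenize(line):
--     tokens = []
--     pending = ''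
--     for ch in line:
--         if ch in 'ns':
--             pending = ch
--         else:
--             tokens.append(pending + ch)
--             pending = ''
--     return tokens
--
--
-- def _parse_tiles_list(tiles_list: List[str]) -> Set[Tuple[int, int]]:
--     black_tiles = set()
--     for line in tiles_list:
--         counts = {}
--         for tok in _tokenize(line):
--             counts[tok] = counts.get(tok, 0) + 1
--         x = sum(n * DIRECTIONS_TO_COORDS[t][0] for t, n in counts.items())
--         y = sum(n * DIRECTIONS_TO_COORDS[t][1] for t, n in counts.items())
--         black_tiles ^= {(x, y)}
--     return black_tiles
-- ===== Notes on version B (the rewrite author's own statement) =====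
-- stated objective: alternative
-- what changed: Per line, B tokenizes with a single pending-prefix fold over characters (instead of A's index-based while loop with two-char lookahead), aggregates the tokens into a count dictionary and obtains the coordinate as the linear combination count*delta over the distinct directions (instead of A's step-by-step delta accumulation), then toggles the tile via set symmetric difference; Pre_ excludes lines that are not sequences of the six direction tokens, on which A raises KeyError/IndexError.
import Mathlib
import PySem

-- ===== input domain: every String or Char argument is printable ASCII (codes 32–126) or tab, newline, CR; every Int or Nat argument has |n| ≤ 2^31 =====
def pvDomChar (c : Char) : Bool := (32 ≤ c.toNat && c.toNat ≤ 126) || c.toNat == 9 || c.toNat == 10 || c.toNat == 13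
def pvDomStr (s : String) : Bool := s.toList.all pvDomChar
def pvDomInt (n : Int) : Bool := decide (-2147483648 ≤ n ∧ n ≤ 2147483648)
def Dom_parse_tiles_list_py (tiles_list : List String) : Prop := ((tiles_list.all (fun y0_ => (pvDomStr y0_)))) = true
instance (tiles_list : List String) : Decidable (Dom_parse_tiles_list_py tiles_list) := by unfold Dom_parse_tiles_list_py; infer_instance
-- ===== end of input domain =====

-- B replaces A's index/lookahead scan by a pending-prefix tokenizing fold plus a count-dictionary
-- linear combination, and toggles tiles by set symmetric difference (objective: alternative).

-- ===== PORT A =====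
-- DIRECTIONS_TO_COORDS
def pvDirs : PySem.Dict String (Int × Int) :=
  ⟨[("e", (1, 0)), ("se", (1, -1)), ("sw", (0, -1)), ("w", (-1, 0)), ("nw", (-1, 1)), ("ne", (0, 1))]⟩

-- A's inner while loop; `none` is exactly where the Python raises (IndexError on the
-- lookahead read, KeyError on the dict lookup).  The indices are nonnegative Nats, so
-- `List.get`/`getElem?` are exact for Python's line[i] here.
def pvLoopA (line : List Char) (x y : Int) (i : Nat) : Option (Int × Int) :=
  if h : i < line.length then
    let ch := line.get ⟨i, h⟩
    if ch = 's' ∨ ch = 'n' then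
      match getElem? line (i+1) with
      | none => none
      | some ch2 =>
        match PySem.Dict.get? pvDirs (String.ofList [ch, ch2]) with
        | none => none
        | some (dx, dy) => pvLoopA line (x + dx) (y + dy) (i + 2)
    else
      match PySem.Dict.get? pvDirs (String.ofList [ch]) with
      | none => none
      | some (dx, dy) => pvLoopA line (x + dx) (y + dy) (i + 1)
  else some (x, y)
  termination_by line.length - i
  decreasing_by all_goals omega

def parse_tiles_list_py (tiles_list : List String) : List (Int × Int) :=
  tiles_list.foldl (fun black line =>
    match pvLoopA line.toList 0 0 0 with
    | none => black  -- unreachable under Pre_ (the Python raises here)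
    | some p =>
      if PySem.Set.contains black p then (PySem.Set.remove? black p).getD black
      else PySem.Set.add black p) []

-- ===== PORT B =====
-- B's _tokenize: one fold keeping (tokens so far, pending 'n'/'s' prefix)
def pvTokenize (line : List Char) : List String :=
  (line.foldl (fun (st : List String × List Char) ch =>
    if ch = 'n' ∨ ch = 's' then (st.1, [ch])
    else (st.1 ++ [String.ofList (st.2 ++ [ch])], [])) ([], [])).1

def parse_tiles_list_py_alt (tiles_list : List String) : List (Int × Int) :=
  tiles_list.foldl (fun black line =>
    let counts : PySem.Dict String Int :=
      (pvTokenize line.toList).foldl (fun d t => d.insert t (d.getD t 0 + 1)) PySem.Dict.empty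
    -- Source B's DIRECTIONS_TO_COORDS[t]: under Pre_ every key of counts is one of the six
    -- directions, so the total lookup with default (0, 0) is exact there
    let x := (counts.items.map (fun tn => tn.2 * (PySem.Dict.getD pvDirs tn.1 (0, 0)).1)).sum
    let y := (counts.items.map (fun tn => tn.2 * (PySem.Dict.getD pvDirs tn.1 (0, 0)).2)).sum
    PySem.Set.symmDiff black [(x, y)]) []

-- ===== PRECONDITION & SPEC =====
-- pvGram: the line is a concatenation of the six direction tokens e|w|se|sw|ne|nw
-- (a regular-grammar membership check on the input, not a re-simulation of either port).
def pvGram : List Char → Bool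
  | [] => true
  | c :: rest =>
    if c = 's' ∨ c = 'n' then
      match rest with
      | [] => false
      | c2 :: rest2 => ((c2 == 'e' || c2 == 'w') && pvGram rest2)
    else if c = 'e' ∨ c = 'w' then pvGram rest
    else false

-- Pre_ excludes exactly the malformed lines, on which the Python A raises KeyError or IndexError.
def Pre_parse_tiles_list_py (tiles_list : List String) : Prop :=
  ∀ line ∈ tiles_list, pvGram line.toList = true
instance (tiles_list : List String) : Decidable (Pre_parse_tiles_list_py tiles_list) := by
  unfold Pre_parse_tiles_list_py; infer_instance

def pvWitness_parse_tiles_list_py : List String := ["esew", ""]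

def Spec_parse_tiles_list_py (tiles_list : List String) (out : List (Int × Int)) : Prop := out = parse_tiles_list_py_alt tiles_list
instance (tiles_list : List String) (out : List (Int × Int)) : Decidable (Spec_parse_tiles_list_py tiles_list out) := by unfold Spec_parse_tiles_list_py; infer_instance

-- ===== CLAIM (what is proved, stated in full; the proofs are below) =====
def Claim_equal_parse_tiles_list_py : Prop := ∀ (tiles_list : List String), Dom_parse_tiles_list_py tiles_list → Pre_parse_tiles_list_py tiles_list → Spec_parse_tiles_list_py tiles_list (parse_tiles_list_py tiles_list)

-- ===== LEMMAS AND PROOFS =====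

-- proof-side structural versions of both inner passes, recursing on the line as pvGram does
def pvToks : List Char → List String
  | [] => []
  | c :: rest =>
    if c = 's' ∨ c = 'n' then
      match rest with
      | [] => []
      | c2 :: rest2 => String.ofList [c, c2] :: pvToks rest2
    else if c = 'e' ∨ c = 'w' then String.ofList [c] :: pvToks rest
    else []

def pvDelta (t : String) : Int × Int := PySem.Dict.getD pvDirs t (0, 0)

def pvLoopL : List Char → Int → Int → Option (Int × Int)
  | [], x, y => some (x, y)
  | c :: rest, x, y =>
    if c = 's' ∨ c = 'n' then
      match rest with
      | [] => none
      | c2 :: rest2 =>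
        match PySem.Dict.get? pvDirs (String.ofList [c, c2]) with
        | none => none
        | some (dx, dy) => pvLoopL rest2 (x + dx) (y + dy)
    else
      match PySem.Dict.get? pvDirs (String.ofList [c]) with
      | none => none
      | some (dx, dy) => pvLoopL rest (x + dx) (y + dy)

lemma pvLoopL_cons_eq (c : Char) (rest : List Char) (x y : Int) :
    pvLoopL (c :: rest) x y =
      if c = 's' ∨ c = 'n' then
        match rest with
        | [] => none
        | c2 :: rest2 =>
          match PySem.Dict.get? pvDirs (String.ofList [c, c2]) with
          | none => none
          | some (dx, dy) => pvLoopL rest2 (x + dx) (y + dy)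
      else
        match PySem.Dict.get? pvDirs (String.ofList [c]) with
        | none => none
        | some (dx, dy) => pvLoopL rest (x + dx) (y + dy) := by rw [pvLoopL.eq_def]

lemma pvToks_cons_eq (c : Char) (rest : List Char) :
    pvToks (c :: rest) =
      if c = 's' ∨ c = 'n' then
        match rest with
        | [] => []
        | c2 :: rest2 => String.ofList [c, c2] :: pvToks rest2
      else if c = 'e' ∨ c = 'w' then String.ofList [c] :: pvToks rest
      else [] := by rw [pvToks.eq_def]

lemma pvG_e : PySem.Dict.get? pvDirs "e" = some (1, 0) := by decide
lemma pvG_w : PySem.Dict.get? pvDirs "w" = some (-1, 0) := by decide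
lemma pvG_se : PySem.Dict.get? pvDirs "se" = some (1, -1) := by decide
lemma pvG_sw : PySem.Dict.get? pvDirs "sw" = some (0, -1) := by decide
lemma pvG_ne : PySem.Dict.get? pvDirs "ne" = some (0, 1) := by decide
lemma pvG_nw : PySem.Dict.get? pvDirs "nw" = some (-1, 1) := by decide
lemma pvD_e : pvDelta "e" = (1, 0) := by decide
lemma pvD_w : pvDelta "w" = (-1, 0) := by decide
lemma pvD_se : pvDelta "se" = (1, -1) := by decide
lemma pvD_sw : pvDelta "sw" = (0, -1) := by decide
lemma pvD_ne : pvDelta "ne" = (0, 1) := by decide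
lemma pvD_nw : pvDelta "nw" = (-1, 1) := by decide

lemma pvGramCons (c c2 : Char) (rest2 : List Char) (hc : c = 's' ∨ c = 'n')
    (h : pvGram (c :: c2 :: rest2) = true) :
    (c2 = 'e' ∨ c2 = 'w') ∧ pvGram rest2 = true := by
  rw [pvGram, if_pos hc] at h
  simpa using h

-- A's while loop, re-indexed to the remaining suffix of the line
lemma pvLoopA_eq_loopL (line : List Char) (x y : Int) (i : Nat) :
    pvLoopA line x y i = pvLoopL (line.drop i) x y := by
  induction x, y, i using pvLoopA.induct line with
  | case1 x y i h ch hsn hnone =>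
    have hsn' : (getElem line i h = 's' ∨ getElem line i h = 'n') := hsn
    have hlen : line.length ≤ i + 1 := List.getElem?_eq_none_iff.mp hnone
    rw [pvLoopA, dif_pos h, List.drop_eq_getElem_cons h,
      List.drop_of_length_le hlen, pvLoopL.eq_def]
    simp only [List.get_eq_getElem]
    rw [if_pos hsn', if_pos hsn']
    simp only [hnone]
  | case2 x y i h ch hsn ch2 hch2 hget =>
    have hsn' : (getElem line i h = 's' ∨ getElem line i h = 'n') := hsn
    have hget' : pvDirs.get? (String.ofList [getElem line i h, ch2]) = none := hget
    have h2 := (List.getElem?_eq_some_iff.mp hch2).1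
    have hc2 := (List.getElem?_eq_some_iff.mp hch2).2
    rw [pvLoopA, dif_pos h, List.drop_eq_getElem_cons h, List.drop_eq_getElem_cons h2,
      pvLoopL.eq_def]
    simp only [List.get_eq_getElem]
    rw [if_pos hsn', if_pos hsn']
    simp only [hch2, hc2]
    simp only [hget']
  | case3 x y i h ch hsn ch2 hch2 dx dy hget ih =>
    have hsn' : (getElem line i h = 's' ∨ getElem line i h = 'n') := hsn
    have hget' : pvDirs.get? (String.ofList [getElem line i h, ch2]) = some (dx, dy) := hget
    have h2 := (List.getElem?_eq_some_iff.mp hch2).1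
    have hc2 := (List.getElem?_eq_some_iff.mp hch2).2
    rw [pvLoopA, dif_pos h, List.drop_eq_getElem_cons h, List.drop_eq_getElem_cons h2,
      pvLoopL.eq_def]
    simp only [List.get_eq_getElem]
    rw [if_pos hsn', if_pos hsn']
    simp only [hch2, hc2]
    simp only [hget']
    exact ih
  | case4 x y i h ch hsn hget =>
    have hsn' : ¬ (getElem line i h = 's' ∨ getElem line i h = 'n') := hsn
    have hget' : pvDirs.get? (String.ofList [getElem line i h]) = none := hget
    rw [pvLoopA, dif_pos h, List.drop_eq_getElem_cons h, pvLoopL.eq_def]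
    simp only [List.get_eq_getElem]
    rw [if_neg hsn', if_neg hsn']
    simp only [hget']
  | case5 x y i h ch hsn dx dy hget ih =>
    have hsn' : ¬ (getElem line i h = 's' ∨ getElem line i h = 'n') := hsn
    have hget' : pvDirs.get? (String.ofList [getElem line i h]) = some (dx, dy) := hget
    rw [pvLoopA, dif_pos h, List.drop_eq_getElem_cons h, pvLoopL.eq_def]
    simp only [List.get_eq_getElem]
    rw [if_neg hsn', if_neg hsn']
    simp only [hget']
    exact ih
  | case6 x y i h =>
    rw [pvLoopA, dif_neg h, List.drop_of_length_le (Nat.le_of_not_lt h), pvLoopL.eq_def]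

-- on a grammatical line A's loop returns the sum of the token deltas
lemma pvLoopL_gram (cs : List Char) (x y : Int) (h : pvGram cs = true) :
    pvLoopL cs x y =
      some (x + ((pvToks cs).map (fun t => (pvDelta t).1)).sum,
            y + ((pvToks cs).map (fun t => (pvDelta t).2)).sum) := by
  induction cs using pvGram.induct generalizing x y with
  | case1 => simp [pvLoopL, pvToks]
  | case2 c hc => rw [pvGram, if_pos hc] at h; simp at h
  | case3 c hc c2 rest2 ih =>
    obtain ⟨hw, h2⟩ := pvGramCons c c2 rest2 hc h
    rcases hc with rfl | rfl <;> rcases hw with rfl | rfl <;>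
      (simp [pvLoopL_cons_eq, pvToks_cons_eq,
        (show String.ofList ['s','e'] = "se" from rfl), (show String.ofList ['s','w'] = "sw" from rfl),
        (show String.ofList ['n','e'] = "ne" from rfl), (show String.ofList ['n','w'] = "nw" from rfl),
        pvG_se, pvG_sw, pvG_ne, pvG_nw, pvD_se, pvD_sw, pvD_ne, pvD_nw]
       rw [ih _ _ h2]
       refine congrArg some (Prod.ext ?_ ?_) <;> simp <;> ring)
  | case4 c rest2 hc hw ih =>
    have h2 : pvGram rest2 = true := by
      rw [pvGram.eq_def] at h
      simpa [hc, hw] using h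
    rcases hw with rfl | rfl <;>
      (simp [pvLoopL_cons_eq, pvToks_cons_eq,
        (show String.ofList ['e'] = "e" from rfl), (show String.ofList ['w'] = "w" from rfl),
        pvG_e, pvG_w, pvD_e, pvD_w]
       rw [ih _ _ h2]
       refine congrArg some (Prod.ext ?_ ?_) <;> (simp; try ring))
  | case5 c rest2 hc hw =>
    rw [pvGram.eq_def] at h
    simp [hc, hw] at h

-- B's tokenizing fold produces exactly the grammar's token list
lemma pvTokenize_aux (cs : List Char) (acc : List String) (h : pvGram cs = true) :
    cs.foldl (fun (st : List String × List Char) ch =>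
      if ch = 'n' ∨ ch = 's' then (st.1, [ch])
      else (st.1 ++ [String.ofList (st.2 ++ [ch])], [])) (acc, [])
      = (acc ++ pvToks cs, []) := by
  induction cs using pvGram.induct generalizing acc with
  | case1 => simp [pvToks]
  | case2 c hc => rw [pvGram, if_pos hc] at h; simp at h
  | case3 c hc c2 rest2 ih =>
    obtain ⟨hw, h2⟩ := pvGramCons c c2 rest2 hc h
    have hc' : c = 'n' ∨ c = 's' := hc.symm
    have hw' : ¬ (c2 = 'n' ∨ c2 = 's') := by rcases hw with rfl | rfl <;> simp
    rw [List.foldl_cons, if_pos hc', List.foldl_cons, if_neg hw']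
    have := ih (acc ++ [String.ofList ([c] ++ [c2])]) h2
    simp only [List.singleton_append] at this ⊢
    rw [this, pvToks_cons_eq, if_pos hc]
    simp
  | case4 c rest2 hc hw ih =>
    have h2 : pvGram rest2 = true := by
      rw [pvGram.eq_def] at h
      simpa [hc, hw] using h
    have hc' : ¬ (c = 'n' ∨ c = 's') := fun h' => hc h'.symm
    rw [List.foldl_cons, if_neg hc']
    have := ih (acc ++ [String.ofList ([] ++ [c])]) h2
    rw [this, pvToks_cons_eq, if_neg hc, if_pos hw]
    simp
  | case5 c rest2 hc hw =>
    rw [pvGram.eq_def] at h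
    simp [hc, hw] at h

lemma pvTokenize_gram (cs : List Char) (h : pvGram cs = true) :
    pvTokenize cs = pvToks cs := by
  rw [pvTokenize, pvTokenize_aux cs [] h]
  simp

lemma pvSumIte (t : String) (g : String → Int) (S : List String) (hS : S.Nodup) (ht : t ∈ S) :
    (S.map (fun k => if k = t then g k else 0)).sum = g t := by
  induction S with
  | nil => cases ht
  | cons a S ih =>
    by_cases hat : a = t
    · subst hat
      have hnot : a ∉ S := (List.nodup_cons.mp hS).1
      have hz : (S.map (fun k => if k = a then g k else 0)).sum = 0 := by
        apply List.sum_eq_zero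
        intro x hx
        rcases List.mem_map.mp hx with ⟨k, hk, rfl⟩
        refine if_neg (fun h => hnot ?_)
        rw [← h]; exact hk
      simp [hz]
    · have hmem : t ∈ S := by
        rcases List.mem_cons.mp ht with h | h
        · exact absurd h.symm hat
        · exact h
      simp only [List.map_cons, List.sum_cons, if_neg hat, zero_add]
      exact ih (List.nodup_cons.mp hS).2 hmem

lemma pvSumOfListCount (f : String → Int) (ts : List String) :
    ((PySem.Set.ofList ts).map (fun k => ((ts.count k : Int)) * f k)).sum = (ts.map f).sum := by
  induction ts using List.reverseRecOn with
  | nil => simp [PySem.Set.ofList_nil]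
  | append_singleton ts t ih =>
    rw [PySem.Set.ofList_append_singleton]
    by_cases ht : t ∈ ts
    · rw [PySem.Set.add_of_mem (by simpa [PySem.Set.mem_ofList] using ht)]
      have hstep : ∀ k, (((ts ++ [t]).count k : Int)) * f k
          = (ts.count k : Int) * f k + (if k = t then f k else 0) := by
        intro k
        by_cases hk : k = t
        · subst hk
          simp [List.count_append]
          ring
        · simp [List.count_append, hk, Ne.symm hk]
      calc ((PySem.Set.ofList ts).map (fun k => (((ts ++ [t]).count k : Int)) * f k)).sum
          = ((PySem.Set.ofList ts).map (fun k => (ts.count k : Int) * f k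
              + (if k = t then f k else 0))).sum := by
            exact congrArg _ (List.map_congr_left (fun k _ => hstep k))
        _ = ((PySem.Set.ofList ts).map (fun k => (ts.count k : Int) * f k)).sum
              + ((PySem.Set.ofList ts).map (fun k => if k = t then f k else 0)).sum := by
            rw [← List.sum_map_add]
        _ = (ts.map f).sum + f t := by
            rw [ih, pvSumIte t f _ (PySem.Set.nodup_ofList ts)
              (by simpa [PySem.Set.mem_ofList] using ht)]
        _ = ((ts ++ [t]).map f).sum := by simp
    · rw [PySem.Set.add_of_not_mem (by simpa [PySem.Set.mem_ofList] using ht)]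
      rw [List.map_append, List.sum_append]
      have h1 : ((PySem.Set.ofList ts).map (fun k => (((ts ++ [t]).count k : Int)) * f k)).sum
          = (ts.map f).sum := by
        rw [← ih]
        apply congrArg
        apply List.map_congr_left
        intro k hk
        have hkts : k ∈ ts := by simpa [PySem.Set.mem_ofList] using hk
        have hne : k ≠ t := fun h => ht (h ▸ hkts)
        simp [List.count_append, Ne.symm hne]
      rw [h1]
      simp [List.count_append, List.count_eq_zero_of_not_mem ht]

-- B's items-of-counter linear combination collapses to the plain sum over the token list
lemma pvCounterSum (f : String → Int) (ts : List String) :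
    (((PySem.Dict.counter ts).items).map (fun tn => tn.2 * f tn.1)).sum = (ts.map f).sum := by
  rw [PySem.Dict.items_counter, List.map_map]
  exact pvSumOfListCount f ts

-- A's membership-guarded remove/add is B's symmetric difference with a singleton
lemma pvToggle (black : List (Int × Int)) (p : Int × Int) :
    (if PySem.Set.contains black p then (PySem.Set.remove? black p).getD black
     else PySem.Set.add black p) = PySem.Set.symmDiff black [p] := by
  by_cases hp : p ∈ black
  · rw [if_pos (by simpa [PySem.Set.contains_iff] using hp)]
    rw [PySem.Set.remove?, if_pos (by simpa [PySem.Set.contains_iff] using hp)]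
    show PySem.Set.discard black p = _
    rw [PySem.Set.symmDiff, PySem.Set.diff, PySem.Set.diff]
    have h1 : List.filter (fun x => !PySem.Set.contains [p] x) black = PySem.Set.discard black p := by
      rw [PySem.Set.discard]
      apply List.filter_congr
      intro a _; cases ha : a == p <;> simp_all
    have h2 : List.filter (fun x => !PySem.Set.contains black x) [p] = [] := by
      simp [List.filter, hp]
    rw [h1, h2, List.append_nil]
  · rw [if_neg (by simpa [PySem.Set.contains_iff] using hp)]
    rw [PySem.Set.add, if_neg (by simpa [PySem.Set.contains_iff] using hp)]
    rw [PySem.Set.symmDiff, PySem.Set.diff, PySem.Set.diff]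
    have h1 : List.filter (fun x => !PySem.Set.contains [p] x) black = black := by
      rw [List.filter_eq_self]
      intro a ha
      cases hq : a == p
      · simp_all
      · exact absurd (by simp_all : a = p) (fun h => hp (h ▸ ha))
    have h2 : List.filter (fun x => !PySem.Set.contains black x) [p] = [p] := by
      simp [List.filter, hp]
    rw [h1, h2]

-- the two per-line steps agree on a grammatical line, from any current tile set
lemma pvStep_eq (line : String) (black : List (Int × Int)) (h : pvGram line.toList = true) :
    (match pvLoopA line.toList 0 0 0 with
     | none => black
     | some p =>
       if PySem.Set.contains black p then (PySem.Set.remove? black p).getD black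
       else PySem.Set.add black p)
    = (let counts : PySem.Dict String Int :=
         (pvTokenize line.toList).foldl (fun d t => d.insert t (d.getD t 0 + 1)) PySem.Dict.empty
       let x := (counts.items.map (fun tn => tn.2 * (PySem.Dict.getD pvDirs tn.1 (0, 0)).1)).sum
       let y := (counts.items.map (fun tn => tn.2 * (PySem.Dict.getD pvDirs tn.1 (0, 0)).2)).sum
       PySem.Set.symmDiff black [(x, y)]) := by
  have hA : pvLoopA line.toList 0 0 0
      = some (((pvToks line.toList).map (fun t => (pvDelta t).1)).sum,
              ((pvToks line.toList).map (fun t => (pvDelta t).2)).sum) := by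
    rw [pvLoopA_eq_loopL, List.drop_zero, pvLoopL_gram _ _ _ h]
    simp
  rw [hA]
  simp only [pvTokenize_gram _ h, PySem.Dict.foldl_insert_getD_add_one_eq_counter]
  rw [pvCounterSum (fun t => (PySem.Dict.getD pvDirs t (0, 0)).1),
    pvCounterSum (fun t => (PySem.Dict.getD pvDirs t (0, 0)).2)]
  exact pvToggle black _

lemma pvFold_eq (tiles_list : List String) (black : List (Int × Int))
    (hpre : ∀ line ∈ tiles_list, pvGram line.toList = true) :
    tiles_list.foldl (fun black line =>
      match pvLoopA line.toList 0 0 0 with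
      | none => black
      | some p =>
        if PySem.Set.contains black p then (PySem.Set.remove? black p).getD black
        else PySem.Set.add black p) black
    = tiles_list.foldl (fun black line =>
        let counts : PySem.Dict String Int :=
          (pvTokenize line.toList).foldl (fun d t => d.insert t (d.getD t 0 + 1)) PySem.Dict.empty
        let x := (counts.items.map (fun tn => tn.2 * (PySem.Dict.getD pvDirs tn.1 (0, 0)).1)).sum
        let y := (counts.items.map (fun tn => tn.2 * (PySem.Dict.getD pvDirs tn.1 (0, 0)).2)).sum
        PySem.Set.symmDiff black [(x, y)]) black := by
  induction tiles_list generalizing black with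
  | nil => rfl
  | cons line rest ih =>
    rw [List.foldl_cons, List.foldl_cons, pvStep_eq line black (hpre line List.mem_cons_self)]
    exact ih _ (fun l hl => hpre l (List.mem_cons_of_mem _ hl))

-- ===== VERDICT (by name: the statement is the Claim_ definition above) =====
theorem parse_tiles_list_py_spec : Claim_equal_parse_tiles_list_py := by
  intro tiles_list _ hpre
  unfold Spec_parse_tiles_list_py parse_tiles_list_py parse_tiles_list_py_alt
  exact pvFold_eq tiles_list [] hpre
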